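-- pv_equiv track=rewrite | github.com/olsenw/LeetCodeExercises | Python3/shortest_distance_to_target_string_in_a_circular_array.py | closetTarget
-- ===== SOURCE A (Python) =====
-- from typing import List, Dict, Set, Optional
--
-- def closetTarget(words: List[str], target: str, startIndex: int) -> int:
--     n = len(words)
--     a,b = n,n
--     if words[startIndex] == target:
--         return 0
--     a,b = 1,1
--     i = startIndex + 1
--     if i == n:
--         i = 0
--     while i != startIndex:
--         if words[i] == target:
--             break
--         a += 1
--         i += 1
--         if i == n:
--             i = 0
--     if a == n:
--         return -1
--     i = startIndex - 1
--     if i == -1: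
--         i = n - 1
--     while i != startIndex:
--         if words[i] == target:
--             break
--         b += 1
--         i -= 1
--         if i == -1:
--             i = n - 1
--     return min(a,b) # if a != n else -1
-- ===== SOURCE B (Python) =====
-- def closetTarget(words, target, startIndex):
--     n = len(words)
--     best = n
--     for i, w in enumerate(words):
--         if w == target:
--             best = min(best, (i - startIndex) % n, (startIndex - i) % n)
--     return -1 if best == n else best
-- ===== Notes on version B (the rewrite author's own statement) =====
-- stated objective: simpler
-- what changed: Replaces the two directional early-breaking wrap-around scans with a single enumerate pass that takes, for every index holding the target, the minimum of the two circular distances (i-startIndex) % n and (startIndex-i) % n, keeping the running minimum (sentinel n means absent, -1).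
import Mathlib
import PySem

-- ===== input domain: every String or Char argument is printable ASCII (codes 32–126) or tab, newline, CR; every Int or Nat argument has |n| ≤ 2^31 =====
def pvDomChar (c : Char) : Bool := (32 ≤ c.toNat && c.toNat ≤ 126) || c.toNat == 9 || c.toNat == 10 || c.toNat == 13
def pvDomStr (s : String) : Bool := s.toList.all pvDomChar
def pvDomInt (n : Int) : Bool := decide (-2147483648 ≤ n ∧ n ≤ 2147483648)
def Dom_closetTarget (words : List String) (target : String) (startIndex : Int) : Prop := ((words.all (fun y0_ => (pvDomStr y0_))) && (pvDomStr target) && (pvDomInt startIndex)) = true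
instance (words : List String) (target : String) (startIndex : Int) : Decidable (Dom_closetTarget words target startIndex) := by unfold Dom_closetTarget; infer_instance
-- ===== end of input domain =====

-- B replaces A's two directional early-breaking circular scans by a single enumerate pass
-- minimising the circular distance of every match (objective: simpler; return value only).

-- ===== PORT A =====
-- forward while-loop of A: state (a, i); wraps i to 0 at n; the fuel only makes the loop total
def fwdA (words : List String) (target : String) (start n : Int) : Nat → Int → Int → Int
  | 0, a, _ => a
  | fuel+1, a, i =>
    if i = start then a
    else if PySem.List.pyGet? words i = some target then a
    else fwdA words target start n fuel (a + 1) (if i + 1 = n then 0 else i + 1)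

-- backward while-loop of A: state (b, i); wraps i to n-1 at -1
def bwdA (words : List String) (target : String) (start n : Int) : Nat → Int → Int → Int
  | 0, b, _ => b
  | fuel+1, b, i =>
    if i = start then b
    else if PySem.List.pyGet? words i = some target then b
    else bwdA words target start n fuel (b + 1) (if i - 1 = -1 then n - 1 else i - 1)

def closetTarget (words : List String) (target : String) (startIndex : Int) : Int :=
  let n : Int := (words.length : Int)
  if PySem.List.pyGet? words startIndex = some target then 0
  else
    let a := fwdA words target startIndex n (2 * words.length) 1
      (if startIndex + 1 = n then 0 else startIndex + 1)
    if a = n then -1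
    else
      let b := bwdA words target startIndex n words.length 1
        (if startIndex - 1 = -1 then n - 1 else startIndex - 1)
      min a b

-- ===== PORT B =====
def closetTarget_alt (words : List String) (target : String) (startIndex : Int) : Int :=
  let n : Int := (words.length : Int)
  let best := (PySem.List.enumerate words).foldl
    (fun best iw =>
      if iw.2 = target then
        min best (min (PySem.Int.mod (iw.1 - startIndex) n) (PySem.Int.mod (startIndex - iw.1) n))
      else best) n
  if best = n then -1 else best

-- ===== PRECONDITION & SPEC =====
-- Pre_ is exactly where A returns: startIndex in range (possibly negative, Python wraparound),
-- and for negative startIndex some match at a position ≤ startIndex+len — otherwise A's forward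
-- scan never terminates or its backward scan overruns the front and raises IndexError.
def Pre_closetTarget (words : List String) (target : String) (startIndex : Int) : Prop :=
  (0 ≤ startIndex ∧ startIndex.toNat < words.length) ∨
  (startIndex < 0 ∧ (-startIndex).toNat ≤ words.length ∧
    ∃ q, q < words.length ∧ (q + (-startIndex).toNat ≤ words.length ∧ words[q]? = some target))
instance (words : List String) (target : String) (startIndex : Int) : Decidable (Pre_closetTarget words target startIndex) := by unfold Pre_closetTarget; infer_instance

def pvWitness_closetTarget : List String × String × Int := (["a", "x", "b"], "x", 0)

def Spec_closetTarget (words : List String) (target : String) (startIndex : Int) (out : Int) : Prop := out = closetTarget_alt words target startIndex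
instance (words : List String) (target : String) (startIndex : Int) (out : Int) : Decidable (Spec_closetTarget words target startIndex out) := by unfold Spec_closetTarget; infer_instance

-- ===== CLAIM (what is proved, stated in full; the proofs are below) =====
def Claim_equal_closetTarget : Prop := ∀ (words : List String) (target : String) (startIndex : Int), Dom_closetTarget words target startIndex → Pre_closetTarget words target startIndex → Spec_closetTarget words target startIndex (closetTarget words target startIndex)

-- ===== LEMMAS AND PROOFS =====

-- arithmetic helpers about Int.emod
lemma addemod (s x n : Int) : (s + x % n) % n = (s + x) % n := by
  conv_rhs => rw [Int.add_emod]
  rw [Int.add_emod s (x % n), Int.emod_emod_of_dvd _ dvd_rfl]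

lemma emodadd (x c n : Int) : (x % n + c) % n = (x + c) % n := by
  conv_rhs => rw [Int.add_emod]
  rw [Int.add_emod (x % n) c, Int.emod_emod_of_dvd _ dvd_rfl]

lemma emodsub (x c n : Int) : (x % n - c) % n = (x - c) % n := by
  conv_rhs => rw [Int.sub_emod]
  rw [Int.sub_emod (x % n) c, Int.emod_emod_of_dvd _ dvd_rfl]

lemma subemod_left (x s n : Int) : (x % n - s) % n = (x - s) % n := emodsub x s n

lemma subemod_right (s x n : Int) : (s - x % n) % n = (s - x) % n := by
  conv_rhs => rw [Int.sub_emod]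
  rw [Int.sub_emod s (x % n), Int.emod_emod_of_dvd _ dvd_rfl]

lemma emod_ne_zero_of_ne {i s n : Int} (h0i : 0 ≤ i) (hin : i < n) (h0s : 0 ≤ s)
    (hsn : s < n) (hne : i ≠ s) : (i - s) % n ≠ 0 := by
  intro h
  have hd : n ∣ (i - s) := Int.dvd_of_emod_eq_zero h
  have := Int.eq_zero_of_abs_lt_dvd hd (by rw [abs_lt]; omega)
  omega

lemma wrap_succ {i n : Int} (h0 : 0 ≤ i) (hn : i < n) :
    (if i + 1 = n then 0 else i + 1) = (i + 1) % n := by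
  by_cases h : i + 1 = n
  · simp [h]
  · rw [if_neg h, Int.emod_eq_of_lt (by omega) (by omega)]

lemma wrap_pred {i n : Int} (h0 : 0 ≤ i) (hn : i < n) :
    (if i - 1 = -1 then n - 1 else i - 1) = (i - 1) % n := by
  by_cases h : i - 1 = -1
  · rw [if_pos h, h, show (-1 : Int) = (n - 1) + (-1) * n by ring,
      Int.add_mul_emod_self_right, Int.emod_eq_of_lt (by omega) (by omega)]
  · rw [if_neg h, Int.emod_eq_of_lt (by omega) (by omega)]

-- forward loop invariant: starting at distance a (position (s+a) % n), the loop returns the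
-- least k ∈ [a, n) whose position matches the target, or n when none does
lemma fwdA_spec (words : List String) (target : String) (s n : Int)
    (hs0 : 0 ≤ s) (hsn : s < n) :
    ∀ (fuel : Nat) (a : Int), 1 ≤ a → a ≤ n → (n - a).toNat ≤ fuel →
      a ≤ fwdA words target s n fuel a ((s + a) % n) ∧
      fwdA words target s n fuel a ((s + a) % n) ≤ n ∧
      (fwdA words target s n fuel a ((s + a) % n) < n →
        PySem.List.pyGet? words ((s + fwdA words target s n fuel a ((s + a) % n)) % n) = some target) ∧
      (∀ k : Int, a ≤ k → k < fwdA words target s n fuel a ((s + a) % n) →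
        PySem.List.pyGet? words ((s + k) % n) ≠ some target) := by
  intro fuel
  induction fuel with
  | zero =>
    intro a h1 h2 h3
    have ha : a = n := by omega
    simp only [fwdA]
    exact ⟨le_refl a, h2, fun h => absurd h (by omega), fun k hk1 hk2 => absurd hk2 (by omega)⟩
  | succ fuel ih =>
    intro a h1 h2 h3
    by_cases ha : a = n
    · have hi : (s + a) % n = s := by
        rw [ha, show s + n = s + n * 1 by ring, Int.add_mul_emod_self_left,
          Int.emod_eq_of_lt hs0 hsn]
      rw [show fwdA words target s n (fuel+1) a ((s + a) % n) =
        if (s + a) % n = s then a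
        else if PySem.List.pyGet? words ((s + a) % n) = some target then a
        else fwdA words target s n fuel (a + 1)
          (if (s + a) % n + 1 = n then 0 else (s + a) % n + 1) from rfl]
      rw [if_pos hi]
      exact ⟨le_refl a, h2, fun h => absurd h (by omega), fun k hk1 hk2 => absurd hk2 (by omega)⟩
    · have han : a < n := lt_of_le_of_ne h2 ha
      have hi0 : 0 ≤ (s + a) % n := Int.emod_nonneg _ (by omega)
      have hin : (s + a) % n < n := Int.emod_lt_of_pos _ (by omega)
      have hne : (s + a) % n ≠ s := by
        intro h
        have h2' : (s + a - s) % n = 0 := by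
          rw [Int.sub_emod, h, subemod_right]; simp
        have hd : n ∣ a := Int.dvd_of_emod_eq_zero (by rwa [add_sub_cancel_left] at h2')
        have := Int.eq_zero_of_abs_lt_dvd hd (by rw [abs_lt]; omega)
        omega
      rw [show fwdA words target s n (fuel+1) a ((s + a) % n) =
        if (s + a) % n = s then a
        else if PySem.List.pyGet? words ((s + a) % n) = some target then a
        else fwdA words target s n fuel (a + 1)
          (if (s + a) % n + 1 = n then 0 else (s + a) % n + 1) from rfl]
      rw [if_neg hne]
      by_cases hm : PySem.List.pyGet? words ((s + a) % n) = some target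
      · rw [if_pos hm]
        exact ⟨le_refl a, h2, fun _ => hm, fun k hk1 hk2 => absurd hk2 (by omega)⟩
      · rw [if_neg hm, wrap_succ hi0 hin,
          show ((s + a) % n + 1) % n = (s + (a + 1)) % n by rw [emodadd, add_assoc]]
        obtain ⟨q1, q2, q3, q4⟩ := ih (a + 1) (by omega) (by omega) (by omega)
        refine ⟨by omega, q2, q3, fun k hk1 hk2 => ?_⟩
        rcases eq_or_lt_of_le hk1 with h | h
        · rw [← h]; exact hm
        · exact q4 k (by omega) hk2

-- backward loop invariant: positions (s-k) % n
lemma bwdA_spec (words : List String) (target : String) (s n : Int)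
    (hs0 : 0 ≤ s) (hsn : s < n) :
    ∀ (fuel : Nat) (a : Int), 1 ≤ a → a ≤ n → (n - a).toNat ≤ fuel →
      a ≤ bwdA words target s n fuel a ((s - a) % n) ∧
      bwdA words target s n fuel a ((s - a) % n) ≤ n ∧
      (bwdA words target s n fuel a ((s - a) % n) < n →
        PySem.List.pyGet? words ((s - bwdA words target s n fuel a ((s - a) % n)) % n) = some target) ∧
      (∀ k : Int, a ≤ k → k < bwdA words target s n fuel a ((s - a) % n) →
        PySem.List.pyGet? words ((s - k) % n) ≠ some target) := by
  intro fuel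
  induction fuel with
  | zero =>
    intro a h1 h2 h3
    have ha : a = n := by omega
    simp only [bwdA]
    exact ⟨le_refl a, h2, fun h => absurd h (by omega), fun k hk1 hk2 => absurd hk2 (by omega)⟩
  | succ fuel ih =>
    intro a h1 h2 h3
    by_cases ha : a = n
    · have hi : (s - a) % n = s := by
        rw [ha, show s - n = s + n * (-1) by ring, Int.add_mul_emod_self_left,
          Int.emod_eq_of_lt hs0 hsn]
      rw [show bwdA words target s n (fuel+1) a ((s - a) % n) =
        if (s - a) % n = s then a
        else if PySem.List.pyGet? words ((s - a) % n) = some target then a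
        else bwdA words target s n fuel (a + 1)
          (if (s - a) % n - 1 = -1 then n - 1 else (s - a) % n - 1) from rfl]
      rw [if_pos hi]
      exact ⟨le_refl a, h2, fun h => absurd h (by omega), fun k hk1 hk2 => absurd hk2 (by omega)⟩
    · have han : a < n := lt_of_le_of_ne h2 ha
      have hi0 : 0 ≤ (s - a) % n := Int.emod_nonneg _ (by omega)
      have hin : (s - a) % n < n := Int.emod_lt_of_pos _ (by omega)
      have hne : (s - a) % n ≠ s := by
        intro h
        have h2' : (s - a - s) % n = 0 := by
          rw [Int.sub_emod, h, subemod_right]; simp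
        have hd : n ∣ (s - a - s) := Int.dvd_of_emod_eq_zero h2'
        have := Int.eq_zero_of_abs_lt_dvd hd (by rw [abs_lt]; omega)
        omega
      rw [show bwdA words target s n (fuel+1) a ((s - a) % n) =
        if (s - a) % n = s then a
        else if PySem.List.pyGet? words ((s - a) % n) = some target then a
        else bwdA words target s n fuel (a + 1)
          (if (s - a) % n - 1 = -1 then n - 1 else (s - a) % n - 1) from rfl]
      rw [if_neg hne]
      by_cases hm : PySem.List.pyGet? words ((s - a) % n) = some target
      · rw [if_pos hm]
        exact ⟨le_refl a, h2, fun _ => hm, fun k hk1 hk2 => by omega⟩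
      · rw [if_neg hm, wrap_pred hi0 hin,
          show ((s - a) % n - 1) % n = (s - (a + 1)) % n by rw [emodsub]; ring_nf]
        obtain ⟨q1, q2, q3, q4⟩ := ih (a + 1) (by omega) (by omega) (by omega)
        refine ⟨by omega, q2, q3, fun k hk1 hk2 => ?_⟩
        rcases eq_or_lt_of_le hk1 with h | h
        · rw [← h]; exact hm
        · exact q4 k (by omega) hk2

-- the B-side fold: an if-guarded running minimum is the fold of min over the filtered map
lemma foldl_if_min {α : Type} (p : α → Prop) [DecidablePred p] (f : α → Int) :
    ∀ (l : List α) (acc : Int),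
      l.foldl (fun b x => if p x then min b (f x) else b) acc
        = ((l.filter (fun x => decide (p x))).map f).foldl min acc := by
  intro l
  induction l with
  | nil => intro acc; simp
  | cons x xs ih =>
    intro acc
    by_cases h : p x <;> simp [h, ih]

lemma foldl_min_le_init : ∀ (l : List Int) (acc : Int), l.foldl min acc ≤ acc := by
  intro l
  induction l with
  | nil => intro acc; simp
  | cons x xs ih =>
    intro acc
    calc (x :: xs).foldl min acc = xs.foldl min (min acc x) := rfl
    _ ≤ min acc x := ih _
    _ ≤ acc := min_le_left _ _

lemma foldl_min_le_mem : ∀ (l : List Int) (acc x : Int), x ∈ l → l.foldl min acc ≤ x := by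
  intro l
  induction l with
  | nil => intro acc x hx; simp at hx
  | cons y ys ih =>
    intro acc x hx
    rcases List.mem_cons.mp hx with h | h
    · subst h
      calc (x :: ys).foldl min acc = ys.foldl min (min acc x) := rfl
      _ ≤ min acc x := foldl_min_le_init _ _
      _ ≤ x := min_le_right _ _
    · exact ih _ x h
lemma foldl_min_cases : ∀ (l : List Int) (acc : Int), l.foldl min acc = acc ∨ l.foldl min acc ∈ l := by
  intro l
  induction l with
  | nil => intro acc; left; rfl
  | cons x xs ih =>
    intro acc
    rcases ih (min acc x) with h | h
    · rcases min_cases acc x with ⟨he, _⟩ | ⟨he, _⟩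
      · left; rw [List.foldl_cons, h, he]
      · right
        have hx : (x :: xs).foldl min acc = x := by rw [List.foldl_cons, h, he]
        rw [hx]; exact List.mem_cons_self
    · right; right; exact h

lemma le_foldl_min : ∀ (l : List Int) (acc c : Int), c ≤ acc → (∀ x ∈ l, c ≤ x) → c ≤ l.foldl min acc := by
  intro l
  induction l with
  | nil => intro acc c h _; exact h
  | cons x xs ih =>
    intro acc c h hall
    exact ih _ c (le_min h (hall x List.mem_cons_self)) (fun y hy => hall y (List.mem_cons_of_mem _ hy))

-- enumerate membership
lemma enum_mem (l : List String) (k : Nat) (hk : k < l.length) :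
    ((k : Int), l[k]) ∈ PySem.List.enumerate l := by
  rw [List.mem_iff_getElem?]
  refine ⟨k, ?_⟩
  rw [PySem.List.getElem?_enumerate]
  simp [List.getElem?_eq_getElem hk]

lemma mem_enum (l : List String) (x : Int × String) (hx : x ∈ PySem.List.enumerate l) :
    ∃ (k : Nat) (h : k < l.length), x = ((k : Int), l[k]'h) := by
  rw [List.mem_iff_getElem?] at hx
  obtain ⟨k, hk⟩ := hx
  rw [PySem.List.getElem?_enumerate] at hk
  rcases h : l[k]? with _ | w
  · rw [h] at hk; simp at hk
  · rw [h] at hk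
    simp only [Option.map_some] at hk
    have hklt : k < l.length := (List.getElem?_eq_some_iff.mp h).1
    refine ⟨k, hklt, ?_⟩
    have hx : ((0 : Int) + (k : Int), w) = x := Option.some.inj hk
    have hw : l[k] = w := by
      have h2 := List.getElem?_eq_getElem hklt
      rw [h] at h2; exact (Option.some.inj h2).symm
    rw [← hx, hw]
    simp

-- pyGet? at a nonnegative in-range Int index
lemma pyGet_int (words : List String) (i : Int) (h0 : 0 ≤ i) (hn : i < (words.length : Int)) :
    PySem.List.pyGet? words i = some (words[i.toNat]'(by omega)) :=
  PySem.List.pyGet?_eq_some_getElem words h0 hn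


-- B characterised: the fold over enumerate is the min-fold over the circular distances of matches
def matchesD (words : List String) (target : String) (s : Int) : List Int :=
  ((PySem.List.enumerate words).filter (fun x => decide (x.2 = target))).map
    (fun iw => min (PySem.Int.mod (iw.1 - s) (words.length : Int))
      (PySem.Int.mod (s - iw.1) (words.length : Int)))

lemma altB (words : List String) (target : String) (s : Int) :
    closetTarget_alt words target s =
      (if (matchesD words target s).foldl min (words.length : Int) = (words.length : Int) then -1
       else (matchesD words target s).foldl min (words.length : Int)) := by
  simp only [closetTarget_alt, matchesD]
  rw [foldl_if_min (fun iw : Int × String => iw.2 = target)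
    (fun iw : Int × String => min (PySem.Int.mod (iw.1 - s) (words.length : Int))
      (PySem.Int.mod (s - iw.1) (words.length : Int))) (PySem.List.enumerate words)
    (words.length : Int)]

lemma mem_matchesD (words : List String) (target : String) (s : Int) (d : Int)
    (hd : d ∈ matchesD words target s) :
    ∃ (k : Nat) (h : k < words.length), words[k]'h = target ∧
      d = min (PySem.Int.mod ((k : Int) - s) (words.length : Int))
        (PySem.Int.mod (s - (k : Int)) (words.length : Int)) := by
  rw [matchesD] at hd
  obtain ⟨x, hxf, hxd⟩ := List.mem_map.mp hd
  obtain ⟨hxe, hxt⟩ := List.mem_filter.mp hxf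
  obtain ⟨k, hk, rfl⟩ := mem_enum words x hxe
  exact ⟨k, hk, by simpa using hxt, hxd.symm⟩

lemma matchesD_mem (words : List String) (target : String) (s : Int) (k : Nat)
    (h : k < words.length) (ht : words[k]'h = target) :
    min (PySem.Int.mod ((k : Int) - s) (words.length : Int))
      (PySem.Int.mod (s - (k : Int)) (words.length : Int)) ∈ matchesD words target s := by
  rw [matchesD]
  refine List.mem_map.mpr ⟨((k : Int), words[k]'h), List.mem_filter.mpr ⟨enum_mem words k h, by simpa using ht⟩, rfl⟩

lemma pyGet_nat (words : List String) (target : String) (k : Nat) (hk : k < words.length)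
    (ht : words[k]'hk = target) : PySem.List.pyGet? words (k : Int) = some target := by
  rw [PySem.List.pyGet?_natCast]
  simp [List.getElem?_eq_getElem hk, ht]

-- indexing with a possibly negative in-range index equals indexing at its emod
lemma pyGet?_emod (words : List String) (s : Int) (hsl : -(words.length : Int) ≤ s)
    (hsu : s < (words.length : Int)) :
    PySem.List.pyGet? words s = PySem.List.pyGet? words (s % (words.length : Int)) := by
  by_cases h0 : 0 ≤ s
  · rw [Int.emod_eq_of_lt h0 hsu]
  · have hn0 : (0 : Int) < (words.length : Int) := by omega
    obtain ⟨k, hk⟩ : ∃ k : Nat, s = -((k : Int)) := ⟨(-s).toNat, by omega⟩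
    subst hk
    have hk0 : 0 < k := by omega
    have hkl : k ≤ words.length := by omega
    have hmod : (-((k : Int))) % (words.length : Int) = (words.length : Int) - k := by
      rw [show (-((k : Int))) = ((words.length : Int) - k) + (-1) * (words.length : Int)
        by ring, Int.add_mul_emod_self_right, Int.emod_eq_of_lt (by omega) (by omega)]
    rw [PySem.List.pyGet?_neg_natCast words k hk0 hkl, hmod,
      show PySem.List.pyGet? words ((words.length : Int) - (k : Int))
          = words[((words.length : Int) - (k : Int)).toNat]? from
        PySem.List.pyGet?_of_nonneg words (by omega)]
    congr 1
    omega

lemma matchesD_congr (words : List String) (target : String) (s t : Int)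
    (hn0 : (0 : Int) < (words.length : Int))
    (h : s % (words.length : Int) = t % (words.length : Int)) :
    matchesD words target s = matchesD words target t := by
  rw [matchesD, matchesD]
  apply List.map_congr_left
  intro x _
  have h1 : PySem.Int.mod (x.1 - s) (words.length : Int)
      = PySem.Int.mod (x.1 - t) (words.length : Int) := by
    rw [PySem.Int.mod_eq_emod_of_pos hn0, PySem.Int.mod_eq_emod_of_pos hn0,
      Int.sub_emod, h, ← Int.sub_emod]
  have h2 : PySem.Int.mod (s - x.1) (words.length : Int)
      = PySem.Int.mod (t - x.1) (words.length : Int) := by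
    rw [PySem.Int.mod_eq_emod_of_pos hn0, PySem.Int.mod_eq_emod_of_pos hn0,
      Int.sub_emod, h, ← Int.sub_emod]
  rw [h1, h2]

-- when the start position itself matches, B's running minimum is 0
lemma altB_zero (words : List String) (target : String) (t : Int)
    (ht0 : 0 ≤ t) (htn : t < (words.length : Int))
    (ht' : t.toNat < words.length) (hget : words[t.toNat] = target) :
    (if (matchesD words target t).foldl min (words.length : Int) = (words.length : Int) then -1
     else (matchesD words target t).foldl min (words.length : Int)) = 0 := by
  have hn0 : (0 : Int) < (words.length : Int) := by omega
  have hDnonneg : ∀ d ∈ matchesD words target t, 0 ≤ d := by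
    intro d hd
    obtain ⟨k, hk, _, rfl⟩ := mem_matchesD words target t d hd
    exact le_min (PySem.Int.mod_nonneg _ hn0) (PySem.Int.mod_nonneg _ hn0)
  have h0D : (0 : Int) ∈ matchesD words target t := by
    have hm := matchesD_mem words target t t.toNat ht' hget
    have hz : min (PySem.Int.mod ((t.toNat : Int) - t) (words.length : Int))
        (PySem.Int.mod (t - (t.toNat : Int)) (words.length : Int)) = 0 := by
      rw [Int.toNat_of_nonneg ht0, sub_self, PySem.Int.mod_eq_emod_of_pos hn0, Int.zero_emod]
      simp
    rwa [hz] at hm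
  have hb1 : (matchesD words target t).foldl min (words.length : Int) ≤ 0 :=
    foldl_min_le_mem _ _ _ h0D
  have hb2 : 0 ≤ (matchesD words target t).foldl min (words.length : Int) :=
    le_foldl_min _ _ 0 (by omega) hDnonneg
  have hbz : (matchesD words target t).foldl min (words.length : Int) = 0 :=
    le_antisymm hb1 hb2
  rw [hbz, if_neg (by omega)]

-- the common core: A's two scan results against B's minimum over all matches
lemma glue (words : List String) (target : String) (t A B : Int)
    (ht0 : 0 ≤ t) (htn : t < (words.length : Int))
    (hS : ¬ PySem.List.pyGet? words t = some target)
    (a1 : 1 ≤ A) (a2 : A ≤ (words.length : Int))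
    (a3 : A < (words.length : Int) →
      PySem.List.pyGet? words ((t + A) % (words.length : Int)) = some target)
    (a4 : ∀ k : Int, 1 ≤ k → k < A →
      ¬ PySem.List.pyGet? words ((t + k) % (words.length : Int)) = some target)
    (b1 : 1 ≤ B) (b2 : B ≤ (words.length : Int))
    (b3 : B < (words.length : Int) →
      PySem.List.pyGet? words ((t - B) % (words.length : Int)) = some target)
    (b4 : ∀ k : Int, 1 ≤ k → k < B →
      ¬ PySem.List.pyGet? words ((t - k) % (words.length : Int)) = some target) :
    (if A = (words.length : Int) then -1 else min A B) =
    (if (matchesD words target t).foldl min (words.length : Int) = (words.length : Int) then -1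
     else (matchesD words target t).foldl min (words.length : Int)) := by
  have hn0 : (0 : Int) < (words.length : Int) := by omega
  have hDnonneg : ∀ d ∈ matchesD words target t, 0 ≤ d := by
    intro d hd
    obtain ⟨k, hk, _, rfl⟩ := mem_matchesD words target t d hd
    exact le_min (PySem.Int.mod_nonneg _ hn0) (PySem.Int.mod_nonneg _ hn0)
  by_cases hAn : A = (words.length : Int)
  · rw [if_pos hAn]
    have hDnil : matchesD words target t = [] := by
      rw [matchesD, List.map_eq_nil_iff, List.filter_eq_nil_iff]
      intro x hx
      obtain ⟨k, hk, rfl⟩ := mem_enum words x hx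
      simp only [decide_eq_true_iff]
      intro hkt
      by_cases hks : (k : Int) = t
      · exact hS (hks ▸ pyGet_nat words target k hk hkt)
      · have h0k : (0 : Int) ≤ (k : Int) := Int.natCast_nonneg k
        have hkn : (k : Int) < (words.length : Int) := by exact_mod_cast hk
        have hfd1 : ((k : Int) - t) % (words.length : Int) ≠ 0 :=
          emod_ne_zero_of_ne h0k hkn ht0 htn hks
        have hfd0 : 0 ≤ ((k : Int) - t) % (words.length : Int) := Int.emod_nonneg _ (by omega)
        have hfdn : ((k : Int) - t) % (words.length : Int) < (words.length : Int) :=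
          Int.emod_lt_of_pos _ hn0
        refine a4 (((k : Int) - t) % (words.length : Int)) (by omega) (by omega) ?_
        rw [addemod, show t + ((k : Int) - t) = (k : Int) by ring,
          Int.emod_eq_of_lt h0k hkn]
        exact pyGet_nat words target k hk hkt
    rw [hDnil]
    simp
  · rw [if_neg hAn]
    have hAlt : A < (words.length : Int) := lt_of_le_of_ne a2 hAn
    -- every match index is at forward distance ≥ A and backward distance ≥ B
    have key_le : ∀ (k : Nat) (hk : k < words.length), words[k]'hk = target →
        A ≤ ((k : Int) - t) % (words.length : Int) ∧
        B ≤ (t - (k : Int)) % (words.length : Int) := by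
      intro k hk hkt
      have hks : (k : Int) ≠ t := by
        intro h; exact hS (h ▸ pyGet_nat words target k hk hkt)
      have h0k : (0 : Int) ≤ (k : Int) := Int.natCast_nonneg k
      have hkn : (k : Int) < (words.length : Int) := by exact_mod_cast hk
      constructor
      · by_contra hlt
        push Not at hlt
        have h1 : ((k : Int) - t) % (words.length : Int) ≠ 0 :=
          emod_ne_zero_of_ne h0k hkn ht0 htn hks
        have h0 : 0 ≤ ((k : Int) - t) % (words.length : Int) := Int.emod_nonneg _ (by omega)
        refine a4 (((k : Int) - t) % (words.length : Int)) (by omega) hlt ?_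
        rw [addemod, show t + ((k : Int) - t) = (k : Int) by ring,
          Int.emod_eq_of_lt h0k hkn]
        exact pyGet_nat words target k hk hkt
      · by_contra hlt
        push Not at hlt
        have h1 : (t - (k : Int)) % (words.length : Int) ≠ 0 :=
          emod_ne_zero_of_ne ht0 htn h0k hkn (Ne.symm hks)
        have h0 : 0 ≤ (t - (k : Int)) % (words.length : Int) := Int.emod_nonneg _ (by omega)
        refine b4 ((t - (k : Int)) % (words.length : Int)) (by omega) hlt ?_
        rw [subemod_right, show t - (t - (k : Int)) = (k : Int) by ring,
          Int.emod_eq_of_lt h0k hkn]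
        exact pyGet_nat words target k hk hkt
    -- best ≤ A, via the match the forward scan found
    have hbestA : (matchesD words target t).foldl min (words.length : Int) ≤ A := by
      have hiA0 : 0 ≤ (t + A) % (words.length : Int) := Int.emod_nonneg _ (by omega)
      have hiAn : (t + A) % (words.length : Int) < (words.length : Int) :=
        Int.emod_lt_of_pos _ hn0
      have hiAt : ((t + A) % (words.length : Int)).toNat < words.length := by omega
      have hiAget : words[((t + A) % (words.length : Int)).toNat] = target := by
        have h := pyGet_int words ((t + A) % (words.length : Int)) hiA0 hiAn
        rw [h] at a3
        exact Option.some.inj (a3 hAlt)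
      have hm := matchesD_mem words target t _ hiAt hiAget
      rw [Int.toNat_of_nonneg hiA0] at hm
      refine le_trans (foldl_min_le_mem _ _ _ hm) ?_
      refine le_trans (min_le_left _ _) ?_
      rw [PySem.Int.mod_eq_emod_of_pos hn0, subemod_left,
        show t + A - t = A by ring, Int.emod_eq_of_lt (by omega) hAlt]
    have hbest_le : (matchesD words target t).foldl min (words.length : Int) ≤ min A B := by
      by_cases hBn : B < (words.length : Int)
      · refine le_min hbestA ?_
        have hjB0 : 0 ≤ (t - B) % (words.length : Int) := Int.emod_nonneg _ (by omega)
        have hjBn : (t - B) % (words.length : Int) < (words.length : Int) :=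
          Int.emod_lt_of_pos _ hn0
        have hjBt : ((t - B) % (words.length : Int)).toNat < words.length := by omega
        have hjBget : words[((t - B) % (words.length : Int)).toNat] = target := by
          have h := pyGet_int words ((t - B) % (words.length : Int)) hjB0 hjBn
          rw [h] at b3
          exact Option.some.inj (b3 hBn)
        have hm := matchesD_mem words target t _ hjBt hjBget
        rw [Int.toNat_of_nonneg hjB0] at hm
        refine le_trans (foldl_min_le_mem _ _ _ hm) ?_
        refine le_trans (min_le_right _ _) ?_
        rw [PySem.Int.mod_eq_emod_of_pos hn0, subemod_right,
          show t - (t - B) = B by ring, Int.emod_eq_of_lt (by omega) hBn]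
      · have hBn' : B = (words.length : Int) := le_antisymm b2 (not_lt.mp hBn)
        rw [min_eq_left (by omega)]
        exact hbestA
    have hle_best : min A B ≤ (matchesD words target t).foldl min (words.length : Int) := by
      rcases foldl_min_cases (matchesD words target t) (words.length : Int) with hc | hc
      · rw [hc]; exact le_trans (min_le_left _ _) a2
      · obtain ⟨k, hk, hkt, hdval⟩ := mem_matchesD words target t _ hc
        obtain ⟨hAk, hBk⟩ := key_le k hk hkt
        rw [hdval, PySem.Int.mod_eq_emod_of_pos hn0, PySem.Int.mod_eq_emod_of_pos hn0]
        exact le_min (le_trans (min_le_left _ _) hAk) (le_trans (min_le_right _ _) hBk)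
    have hbest : (matchesD words target t).foldl min (words.length : Int) = min A B :=
      le_antisymm hbest_le hle_best
    have hmlt : min A B < (words.length : Int) := lt_of_le_of_lt (min_le_left _ _) hAlt
    rw [hbest, if_neg (ne_of_lt hmlt)]

-- forward loop from a negative raw index: no wrap happens before the guaranteed match
lemma fwdA_neg_spec (words : List String) (target : String) (s : Int) (hneg : s < 0) :
    ∀ (fuel : Nat) (a : Int), 1 ≤ a → s + a ≤ (words.length : Int) →
      (∃ p : Int, s + a ≤ p ∧ p < (words.length : Int) ∧
        PySem.List.pyGet? words p = some target) →
      ((words.length : Int) - (s + a)).toNat ≤ fuel →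
      a ≤ fwdA words target s (words.length : Int) fuel a (s + a) ∧
      s + fwdA words target s (words.length : Int) fuel a (s + a) < (words.length : Int) ∧
      PySem.List.pyGet? words (s + fwdA words target s (words.length : Int) fuel a (s + a))
        = some target ∧
      (∀ k : Int, a ≤ k → k < fwdA words target s (words.length : Int) fuel a (s + a) →
        ¬ PySem.List.pyGet? words (s + k) = some target) := by
  intro fuel
  induction fuel with
  | zero =>
    intro a h1 h2 hex h3
    obtain ⟨p, hp1, hp2, _⟩ := hex
    omega
  | succ fuel ih =>
    intro a h1 h2 hex h3
    obtain ⟨p, hp1, hp2, hp3⟩ := hex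
    rw [show fwdA words target s (words.length : Int) (fuel+1) a (s + a) =
      if s + a = s then a
      else if PySem.List.pyGet? words (s + a) = some target then a
      else fwdA words target s (words.length : Int) fuel (a + 1)
        (if s + a + 1 = (words.length : Int) then 0 else s + a + 1) from rfl]
    rw [if_neg (by omega)]
    by_cases hm : PySem.List.pyGet? words (s + a) = some target
    · rw [if_pos hm]
      exact ⟨le_refl a, by omega, hm, fun k hk1 hk2 => absurd hk2 (by omega)⟩
    · rw [if_neg hm]
      have hpne : p ≠ s + a := fun h => hm (h ▸ hp3)
      rw [if_neg (by omega), show s + a + 1 = s + (a + 1) by ring]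
      obtain ⟨q1, q2, q3, q4⟩ := ih (a + 1) (by omega) (by omega)
        ⟨p, by omega, hp2, hp3⟩ (by omega)
      refine ⟨by omega, q2, q3, fun k hk1 hk2 => ?_⟩
      rcases eq_or_lt_of_le hk1 with h | h
      · rw [← h]; exact hm
      · exact q4 k (by omega) hk2

-- backward loop from a negative raw index: scans straight down, no wrap at -1
lemma bwdA_neg_spec (words : List String) (target : String) (s : Int) (hneg : s < 0) :
    ∀ (fuel : Nat) (a : Int), 1 ≤ a →
      (∃ p : Int, -(words.length : Int) ≤ p ∧ p ≤ s - a ∧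
        PySem.List.pyGet? words p = some target) →
      (s - a + (words.length : Int)).toNat ≤ fuel →
      a ≤ bwdA words target s (words.length : Int) fuel a (s - a) ∧
      -(words.length : Int) ≤ s - bwdA words target s (words.length : Int) fuel a (s - a) ∧
      PySem.List.pyGet? words (s - bwdA words target s (words.length : Int) fuel a (s - a))
        = some target ∧
      (∀ k : Int, a ≤ k → k < bwdA words target s (words.length : Int) fuel a (s - a) →
        ¬ PySem.List.pyGet? words (s - k) = some target) := by
  intro fuel
  induction fuel with
  | zero =>
    intro a h1 hex h3
    obtain ⟨p, hp1, hp2, hp3⟩ := hex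
    have hpa : p = s - a := by omega
    simp only [bwdA]
    exact ⟨le_refl a, by omega, hpa ▸ hp3, fun k hk1 hk2 => absurd hk2 (by omega)⟩
  | succ fuel ih =>
    intro a h1 hex h3
    obtain ⟨p, hp1, hp2, hp3⟩ := hex
    rw [show bwdA words target s (words.length : Int) (fuel+1) a (s - a) =
      if s - a = s then a
      else if PySem.List.pyGet? words (s - a) = some target then a
      else bwdA words target s (words.length : Int) fuel (a + 1)
        (if s - a - 1 = -1 then (words.length : Int) - 1 else s - a - 1) from rfl]
    rw [if_neg (by omega)]
    by_cases hm : PySem.List.pyGet? words (s - a) = some target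
    · rw [if_pos hm]
      exact ⟨le_refl a, by omega, hm, fun k hk1 hk2 => absurd hk2 (by omega)⟩
    · rw [if_neg hm]
      have hpne : p ≠ s - a := fun h => hm (h ▸ hp3)
      rw [if_neg (by omega), show s - a - 1 = s - (a + 1) by ring]
      obtain ⟨q1, q2, q3, q4⟩ := ih (a + 1) (by omega) ⟨p, hp1, by omega, hp3⟩ (by omega)
      refine ⟨by omega, q2, q3, fun k hk1 hk2 => ?_⟩
      rcases eq_or_lt_of_le hk1 with h | h
      · rw [← h]; exact hm
      · exact q4 k (by omega) hk2

-- main equality, in-range start index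
theorem main_eq_pos (words : List String) (target : String) (s : Int)
    (hs0 : 0 ≤ s) (hsn : s < (words.length : Int)) :
    closetTarget words target s = closetTarget_alt words target s := by
  have hn0 : (0 : Int) < (words.length : Int) := by omega
  rw [altB words target s]
  simp only [closetTarget]
  by_cases hS : PySem.List.pyGet? words s = some target
  · rw [if_pos hS]
    have hget : words[s.toNat] = target := by
      have h := pyGet_int words s hs0 hsn
      rw [h] at hS; exact Option.some.inj hS
    exact (altB_zero words target s hs0 hsn (by omega) hget).symm
  · rw [if_neg hS, wrap_succ hs0 hsn, wrap_pred hs0 hsn]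
    obtain ⟨a1, a2, a3, a4⟩ := fwdA_spec words target s (words.length : Int) hs0 hsn
      (2 * words.length) 1 (le_refl 1) (by omega) (by omega)
    obtain ⟨b1, b2, b3, b4⟩ := bwdA_spec words target s (words.length : Int) hs0 hsn
      words.length 1 (le_refl 1) (by omega) (by omega)
    exact glue words target s _ _ hs0 hsn hS a1 a2 a3 a4 b1 b2 b3 b4

-- main equality, negative in-range start index with a match at position ≤ startIndex+len
theorem main_eq_neg (words : List String) (target : String) (s : Int) (q : Nat)
    (hneg : s < 0) (hql : (q : Int) ≤ s + (words.length : Int))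
    (hqget : words[q]? = some target) :
    closetTarget words target s = closetTarget_alt words target s := by
  have hqlen : q < words.length := by omega
  have hn0 : (0 : Int) < (words.length : Int) := by omega
  have hsl : -(words.length : Int) ≤ s := by omega
  have hsu : s < (words.length : Int) := by omega
  have hq_match : PySem.List.pyGet? words (q : Int) = some target := by
    rw [PySem.List.pyGet?_natCast]; exact hqget
  have ht0 : 0 ≤ s % (words.length : Int) := Int.emod_nonneg _ (by omega)
  have htn : s % (words.length : Int) < (words.length : Int) := Int.emod_lt_of_pos _ hn0
  have htval : s % (words.length : Int) = s + (words.length : Int) := by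
    conv_lhs => rw [show s = (s + (words.length : Int)) + (-1) * (words.length : Int) by ring]
    rw [Int.add_mul_emod_self_right, Int.emod_eq_of_lt (by omega) (by omega)]
  rw [altB words target s,
    matchesD_congr words target s (s % (words.length : Int)) hn0
      (Int.emod_emod_of_dvd _ dvd_rfl).symm]
  simp only [closetTarget]
  by_cases hS : PySem.List.pyGet? words s = some target
  · rw [if_pos hS]
    have hSt : PySem.List.pyGet? words (s % (words.length : Int)) = some target := by
      rw [← pyGet?_emod words s hsl hsu]; exact hS
    have hget : words[(s % (words.length : Int)).toNat] = target := by
      have h := pyGet_int words (s % (words.length : Int)) ht0 htn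
      rw [h] at hSt; exact Option.some.inj hSt
    exact (altB_zero words target (s % (words.length : Int)) ht0 htn (by omega) hget).symm
  · rw [if_neg hS]
    have hSt : ¬ PySem.List.pyGet? words (s % (words.length : Int)) = some target := by
      rw [← pyGet?_emod words s hsl hsu]; exact hS
    -- the match q is strictly before position s+len (else hS would hold)
    have hqlt : (q : Int) < s + (words.length : Int) := by
      rcases lt_or_eq_of_le hql with h | h
      · exact h
      · exfalso
        apply hSt
        rw [htval, ← h]
        exact hq_match
    rw [if_neg (show ¬ s + 1 = (words.length : Int) by omega),
      if_neg (show ¬ s - 1 = -1 by omega)]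
    -- forward scan facts (raw indices)
    obtain ⟨ra1, ra2, ra3, ra4⟩ := fwdA_neg_spec words target s hneg (2 * words.length) 1
      (le_refl 1) (by omega) ⟨(q : Int), by omega, by omega, hq_match⟩ (by omega)
    -- backward scan facts (raw indices)
    obtain ⟨rb1, rb2, rb3, rb4⟩ := bwdA_neg_spec words target s hneg words.length 1
      (le_refl 1)
      ⟨(q : Int) - (words.length : Int), by omega, by omega, by
        rw [pyGet?_emod words ((q : Int) - (words.length : Int)) (by omega) (by omega),
          show ((q : Int) - (words.length : Int)) = (q : Int) + (-1) * (words.length : Int)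
            by ring, Int.add_mul_emod_self_right, Int.emod_eq_of_lt (by omega) (by omega)]
        exact hq_match⟩
      (by omega)
    rw [show s + (1 : Int) = s + 1 from rfl] at ra1 ra2 ra3 ra4
    rw [show s - (1 : Int) = s - 1 from rfl] at rb1 rb2 rb3 rb4
    -- minimality against the known match q bounds both scan results below len
    have hA_le : fwdA words target s (words.length : Int) (2 * words.length) 1 (s + 1)
        ≤ (q : Int) - s := by
      by_contra hlt
      push Not at hlt
      refine ra4 ((q : Int) - s) (by omega) hlt ?_
      rw [show s + ((q : Int) - s) = (q : Int) by ring]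
      exact hq_match
    have hB_le : bwdA words target s (words.length : Int) words.length 1 (s - 1)
        ≤ s + (words.length : Int) - (q : Int) := by
      by_contra hlt
      push Not at hlt
      refine rb4 (s + (words.length : Int) - (q : Int)) (by omega) hlt ?_
      rw [show s - (s + (words.length : Int) - (q : Int))
        = (q : Int) + (-1) * (words.length : Int) by ring]
      rw [pyGet?_emod words ((q : Int) + (-1) * (words.length : Int)) (by omega) (by omega),
        Int.add_mul_emod_self_right, Int.emod_eq_of_lt (by omega) (by omega)]
      exact hq_match
    -- translate raw facts to canonical-position form and glue
    refine glue words target (s % (words.length : Int)) _ _ ht0 htn hSt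
      ra1 (by omega) (fun _ => ?_) (fun k hk1 hk2 => ?_) rb1 (by omega)
      (fun _ => ?_) (fun k hk1 hk2 => ?_)
    · rw [emodadd, ← pyGet?_emod words
        (s + fwdA words target s (words.length : Int) (2 * words.length) 1 (s + 1))
        (by omega) (by omega)]
      exact ra3
    · rw [emodadd, ← pyGet?_emod words (s + k) (by omega) (by omega)]
      exact ra4 k hk1 hk2
    · rw [emodsub, ← pyGet?_emod words
        (s - bwdA words target s (words.length : Int) words.length 1 (s - 1))
        (by omega) (by omega)]
      exact rb3
    · rw [emodsub, ← pyGet?_emod words (s - k) (by omega) (by omega)]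
      exact rb4 k hk1 hk2

-- ===== VERDICT (by name: the statement is the Claim_ definition above) =====
theorem closetTarget_spec : Claim_equal_closetTarget := by
  intro words target startIndex _ hpre
  unfold Spec_closetTarget
  rcases hpre with ⟨h0, hlt⟩ | ⟨hneg, hlen, q, hq1, hq2, hq3⟩
  · exact main_eq_pos words target startIndex h0 (by omega)
  · exact main_eq_neg words target startIndex q hneg (by omega) hq3
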